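-- pv_equiv track=rewrite | github.com/HyeseungNA/algorithm_prac | 프로그래머스/2/17679. ［1차］ 프렌즈4블록/［1차］ 프렌즈4블록.py | solution
-- ===== SOURCE A (Python) =====
-- def solution(m, n, board):
--     board = [list(row) for row in board]
--     answer = 0
--
--     tmp = set()
--     while True:
--
--         for i in range(m-1):
--             for j in range(n-1):
--                 t = board[i][j]
--
--                 if t == ' ':
--                     continue
--
--                 if board[i+1][j] == t and board[i][j+1] == t and board[i+1][j+1] == t:
--                     tmp.add((i, j))
--                     tmp.add((i+1, j))
--                     tmp.add((i, j+1))
--                     tmp.add((i+1, j+1))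
--
--         if tmp:
--             answer += len(tmp)
--             for i, j in tmp:
--                 board[i][j] = ' '
--             tmp.clear()
--
--         else:
--             break
--
--         while True:
--             moved = 0
--             for i in range(m-1):
--                 for j in range(n):
--                     if board[i][j] != ' ' and board[i+1][j] == ' ':
--                         board[i][j], board[i+1][j] = board[i+1][j], board[i][j]
--                         moved = 1
--             if moved == 0:
--                 break
--     return answer
-- ===== SOURCE B (Python) =====
-- def solution(m, n, board):
--     grid = [list(row) for row in board]
--     answer = 0
--     while True:
--         marks = set(
--             c
--             for i in range(m - 1)
--             for j in range(n - 1)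
--             if grid[i][j] != ' '
--             and grid[i][j] == grid[i + 1][j] == grid[i][j + 1] == grid[i + 1][j + 1]
--             for c in ((i, j), (i + 1, j), (i, j + 1), (i + 1, j + 1))
--         )
--         if not marks:
--             return answer
--         answer += len(marks)
--         cols = []
--         for j in range(n):
--             kept = [grid[i][j] for i in range(m)
--                     if (i, j) not in marks and grid[i][j] != ' ']
--             cols.append([' '] * (m - len(kept)) + kept)
--         grid = [[cols[j][i] for j in range(n)] for i in range(m)]
-- ===== Notes on version B (the rewrite author's own statement) =====
-- stated objective: simpler
-- what changed: A's gravity step of repeated full-board adjacent-swap passes until a fixpoint is replaced by a single stable per-column compaction fused with the removal step (survivors of each column are collected top-to-bottom and re-padded with spaces), and the cleared cells are collected by a set comprehension instead of nested add calls.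
-- outside the precondition, e.g. on solution(2, 3, [' b', 'cd']): A returns 0, B returns 0
import Mathlib
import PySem

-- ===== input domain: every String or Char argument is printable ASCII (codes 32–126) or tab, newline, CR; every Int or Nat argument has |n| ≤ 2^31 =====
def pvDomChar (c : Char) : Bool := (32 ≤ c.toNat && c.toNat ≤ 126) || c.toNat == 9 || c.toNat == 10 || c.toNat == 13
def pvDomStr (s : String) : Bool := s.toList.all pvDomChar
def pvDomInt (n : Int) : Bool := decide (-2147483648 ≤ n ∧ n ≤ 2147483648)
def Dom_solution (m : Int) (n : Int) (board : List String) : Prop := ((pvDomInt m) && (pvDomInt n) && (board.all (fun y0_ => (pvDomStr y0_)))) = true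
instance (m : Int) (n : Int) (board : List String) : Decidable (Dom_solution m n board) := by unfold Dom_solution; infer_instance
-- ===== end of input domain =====

-- B replaces A's repeated adjacent-swap gravity passes with a single stable per-column
-- compaction fused with the removal step (objective: simpler); the return value is all
-- that is compared (neither version mutates the caller's board).

-- shared 2-D accessors (both Pythons read/write grid[i][j] the same way)
def pvCell (b : List (List Char)) (i j : Int) : Char :=
  PySem.List.pyGetD (PySem.List.pyGetD b i []) j ' '

def pvSetCell (b : List (List Char)) (i j : Int) (v : Char) : List (List Char) :=
  PySem.List.pySetD b i (PySem.List.pySetD (PySem.List.pyGetD b i []) j v)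

-- ===== PORT A =====

-- one step of A's 2x2 match scan (tmp.add × 4 when the block matches)
def pvScanStepA (b : List (List Char)) (i : Int) (tmp : PySem.Set (Int × Int)) (j : Int) :
    PySem.Set (Int × Int) :=
  let t := pvCell b i j
  if t = ' ' then tmp
  else if pvCell b (i+1) j = t ∧ pvCell b i (j+1) = t ∧ pvCell b (i+1) (j+1) = t then
    ((((tmp.add (i, j)).add (i+1, j)).add (i, j+1)).add (i+1, j+1))
  else tmp

def pvScanA (m n : Int) (b : List (List Char)) : PySem.Set (Int × Int) :=
  (PySem.List.pyRange 0 (m-1) 1).foldl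
    (fun tmp i => (PySem.List.pyRange 0 (n-1) 1).foldl (pvScanStepA b i) tmp)
    PySem.Set.empty

-- A's gravity: one swap attempt at (i,j) (RHS pair read first, then both cells written)
def pvSwapStepA (i : Int) (st : List (List Char) × Int) (j : Int) : List (List Char) × Int :=
  if pvCell st.1 i j ≠ ' ' ∧ pvCell st.1 (i+1) j = ' ' then
    (pvSetCell (pvSetCell st.1 i j (pvCell st.1 (i+1) j)) (i+1) j (pvCell st.1 i j), 1)
  else st

-- one full pass of A's inner while body (moved reset to 0, nested i/j loops)
def pvPassA (m n : Int) (b : List (List Char)) : List (List Char) × Int :=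
  (PySem.List.pyRange 0 (m-1) 1).foldl
    (fun st i => (PySem.List.pyRange 0 n 1).foldl (pvSwapStepA i) st) (b, 0)

-- A's inner 'while True: … if moved == 0: break' (fuel makes it total; it is provably
-- never exhausted under Pre_: each moved pass strictly lowers the space-position measure)
def pvGravA (m n : Int) : Nat → List (List Char) → List (List Char)
  | 0, b => b
  | f+1, b =>
    let st := pvPassA m n b
    if st.2 = 0 then st.1 else pvGravA m n f st.1

-- A's outer 'while True' (fuel, never exhausted: every round blanks ≥ 1 non-space cell)
def pvLoopA (m n : Int) : Nat → List (List Char) → Int → Int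
  | 0, _, answer => answer
  | f+1, b, answer =>
    let tmp := pvScanA m n b
    if tmp = [] then answer
    else
      pvLoopA m n f
        (pvGravA m n ((m*m*n).toNat + 1)
          (tmp.foldl (fun b ij => pvSetCell b ij.1 ij.2 ' ') b))
        (answer + PySem.Set.len tmp)

def solution (m : Int) (n : Int) (board : List String) : Int :=
  pvLoopA m n ((m*n).toNat + 1) (board.map (fun row => row.toList)) 0

-- ===== PORT B =====

-- B's marks: set( … generator over matching 2x2 blocks … )
def pvMarksB (m n : Int) (b : List (List Char)) : PySem.Set (Int × Int) :=
  PySem.Set.ofList ((PySem.List.pyRange 0 (m-1) 1).flatMap (fun i =>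
    (PySem.List.pyRange 0 (n-1) 1).flatMap (fun j =>
      if pvCell b i j ≠ ' ' ∧ pvCell b i j = pvCell b (i+1) j ∧
          pvCell b (i+1) j = pvCell b i (j+1) ∧ pvCell b i (j+1) = pvCell b (i+1) (j+1) then
        [(i, j), (i+1, j), (i, j+1), (i+1, j+1)]
      else [])))

-- B's kept survivors of column j (unmarked, non-space, top-to-bottom)
def pvKeptB (m : Int) (b : List (List Char)) (marks : PySem.Set (Int × Int)) (j : Int) :
    List Char :=
  (PySem.List.pyRange 0 m 1).filterMap (fun i =>
    if ¬ (i, j) ∈ marks ∧ pvCell b i j ≠ ' ' then some (pvCell b i j) else none)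

-- B's compacted columns: [' '] * (m - len(kept)) + kept
def pvColsB (m n : Int) (b : List (List Char)) (marks : PySem.Set (Int × Int)) :
    List (List Char) :=
  (PySem.List.pyRange 0 n 1).map (fun j =>
    let kept := pvKeptB m b marks j
    List.replicate (m - PySem.List.len kept).toNat ' ' ++ kept)

-- grid = [[cols[j][i] for j in range(n)] for i in range(m)]
def pvRegridB (m n : Int) (cols : List (List Char)) : List (List Char) :=
  (PySem.List.pyRange 0 m 1).map (fun i =>
    (PySem.List.pyRange 0 n 1).map (fun j => pvCell cols j i))

-- B's outer 'while True' (same fuel guard as A's port)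
def pvLoopB (m n : Int) : Nat → List (List Char) → Int → Int
  | 0, _, answer => answer
  | f+1, b, answer =>
    let marks := pvMarksB m n b
    if marks = [] then answer
    else pvLoopB m n f (pvRegridB m n (pvColsB m n b marks)) (answer + PySem.Set.len marks)

def solution_alt (m : Int) (n : Int) (board : List String) : Int :=
  pvLoopB m n ((m*n).toNat + 1) (board.map (fun row => row.toList)) 0

-- ===== PRECONDITION & SPEC =====
-- Pre_ excludes malformed inputs (board size ≠ m or a row length ≠ n, with m, n ≥ 2):
-- there A raises IndexError, or — when blanks short-circuit its scan — returns a value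
-- that is an accident of which cells the scan happens to read; degenerate boards
-- (m ≤ 1 or n ≤ 1), where no 2x2 block exists at all, stay inside.
def Pre_solution (m : Int) (n : Int) (board : List String) : Prop :=
  (m ≤ 1 ∨ n ≤ 1) ∨ (m = (board.length : Int) ∧ ∀ s ∈ board, (s.toList.length : Int) = n)
instance (m : Int) (n : Int) (board : List String) : Decidable (Pre_solution m n board) := by
  unfold Pre_solution; infer_instance

def pvWitness_solution : Int × Int × List String :=
  (4, 5, ["CCBDE", "AAADE", "AAABF", "CCBBF"])

def Spec_solution (m : Int) (n : Int) (board : List String) (out : Int) : Prop :=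
  out = solution_alt m n board
instance (m : Int) (n : Int) (board : List String) (out : Int) :
    Decidable (Spec_solution m n board out) := by unfold Spec_solution; infer_instance

-- ===== CLAIM (what is proved, stated in full; the proofs are below) =====
def Claim_equal_solution : Prop := ∀ (m : Int) (n : Int) (board : List String),
  Dom_solution m n board → Pre_solution m n board →
  Spec_solution m n board (solution m n board)

-- ===== LEMMAS AND PROOFS =====

-- board shape: M rows, each of length N
def pvShape (M N : Nat) (b : List (List Char)) : Prop :=
  b.length = M ∧ ∀ r ∈ b, r.length = N

-- column j of a board, top to bottom (default ' ' outside)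
def pvCol (j : Nat) (b : List (List Char)) : List Char :=
  b.map (fun r => r.getD j ' ')

-- one top-down bubble sweep of a single column (structural view of A's pass)
def pvSweep : List Char → List Char
  | [] => []
  | [x] => [x]
  | x :: y :: t =>
    if x ≠ ' ' ∧ y = ' ' then ' ' :: pvSweep (x :: t) else x :: pvSweep (y :: t)

-- stable compaction of a column: spaces on top, survivors below in order
def pvCompact (c : List Char) : List Char :=
  List.replicate (c.count ' ') ' ' ++ c.filter (fun x => x ≠ ' ')

-- structural form of A's j-loop on the row pair (i, i+1)
def pvPairSweep : List Char → List Char → List Char × List Char × Bool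
  | a :: r, bb :: s =>
    let p := pvPairSweep r s
    if a ≠ ' ' ∧ bb = ' ' then (bb :: p.1, a :: p.2.1, true) else (a :: p.1, bb :: p.2.1, p.2.2)
  | r, s => (r, s, false)

-- structural form of A's full pass (i ascending over adjacent row pairs)
def pvRowSweep : List (List Char) → List (List Char) × Bool
  | r1 :: r2 :: rest =>
    let p := pvPairSweep r1 r2
    let q := pvRowSweep (p.2.1 :: rest)
    (p.1 :: q.1, p.2.2 || q.2)
  | l => (l, false)
termination_by l => l.length
decreasing_by simp

-- measure: a non-space cell at depth i in a column of length L weighs L - i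
def pvNu : List Char → Nat
  | [] => 0
  | x :: t => (if x = ' ' then 0 else t.length + 1) + pvNu t

theorem pvSweep_length (c : List Char) : (pvSweep c).length = c.length := by
  fun_induction pvSweep c <;> simp_all

theorem pvSweep_filter (c : List Char) :
    (pvSweep c).filter (fun x => x ≠ ' ') = c.filter (fun x => x ≠ ' ') := by
  fun_induction pvSweep c with
  | case1 => rfl
  | case2 x => rfl
  | case3 x y t h ih =>
    obtain ⟨hx, hy⟩ := h
    subst hy
    simp only [List.filter_cons] at *
    simp_all
  | case4 x y t h ih =>
    simp only [List.filter_cons] at *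
    rw [ih]

theorem pvSweep_count (c : List Char) : (pvSweep c).count ' ' = c.count ' ' := by
  fun_induction pvSweep c with
  | case1 => rfl
  | case2 x => rfl
  | case3 x y t h ih =>
    obtain ⟨hx, hy⟩ := h
    subst hy
    simp_all
  | case4 x y t h ih =>
    rw [List.count_cons, List.count_cons, ih]

theorem pvCompact_sweep (c : List Char) : pvCompact (pvSweep c) = pvCompact c := by
  unfold pvCompact
  rw [pvSweep_count, pvSweep_filter]

theorem pvNu_sweep_le (c : List Char) : pvNu (pvSweep c) ≤ pvNu c := by
  fun_induction pvSweep c with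
  | case1 => simp
  | case2 x => simp
  | case3 x y t h ih =>
    obtain ⟨hx, hy⟩ := h
    subst hy
    have e1 : pvNu (' ' :: pvSweep (x :: t)) = pvNu (pvSweep (x :: t)) := by
      simp [pvNu]
    have e2 : pvNu (x :: ' ' :: t) = t.length + 2 + pvNu t := by
      simp [pvNu, if_neg hx]
      try omega
    have e3 : pvNu (x :: t) = t.length + 1 + pvNu t := by
      simp [pvNu, if_neg hx]
    rw [e1, e2]
    rw [e3] at ih
    omega
  | case4 x y t h ih =>
    have hl := pvSweep_length (y :: t)
    have e1 : pvNu (x :: pvSweep (y :: t)) =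
        (if x = ' ' then 0 else (pvSweep (y :: t)).length + 1) + pvNu (pvSweep (y :: t)) := rfl
    have e2 : pvNu (x :: y :: t) = (if x = ' ' then 0 else (y :: t).length + 1) + pvNu (y :: t) := rfl
    rw [e1, e2, hl]
    split <;> omega

theorem pvNu_sweep_lt (c : List Char) (h : pvSweep c ≠ c) : pvNu (pvSweep c) < pvNu c := by
  fun_induction pvSweep c with
  | case1 => simp at h
  | case2 x => exact absurd rfl h
  | case3 x y t hc ih =>
    obtain ⟨hx, hy⟩ := hc
    subst hy
    have hle := pvNu_sweep_le (x :: t)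
    have e1 : pvNu (' ' :: pvSweep (x :: t)) = pvNu (pvSweep (x :: t)) := by
      simp [pvNu]
    have e2 : pvNu (x :: ' ' :: t) = t.length + 2 + pvNu t := by
      simp [pvNu, if_neg hx]
      try omega
    have e3 : pvNu (x :: t) = t.length + 1 + pvNu t := by
      simp [pvNu, if_neg hx]
    rw [e1, e2]
    rw [e3] at hle
    omega
  | case4 x y t hc ih =>
    have hne : pvSweep (y :: t) ≠ y :: t := by
      intro he; apply h; rw [he]
    have hlt := ih hne
    have hl := pvSweep_length (y :: t)
    have e1 : pvNu (x :: pvSweep (y :: t)) =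
        (if x = ' ' then 0 else (pvSweep (y :: t)).length + 1) + pvNu (pvSweep (y :: t)) := rfl
    have e2 : pvNu (x :: y :: t) = (if x = ' ' then 0 else (y :: t).length + 1) + pvNu (y :: t) := rfl
    rw [e1, e2, hl]
    split <;> omega

theorem pvSweep_fix (c : List Char) (h : pvSweep c = c) : c = pvCompact c := by
  fun_induction pvSweep c with
  | case1 => rfl
  | case2 x =>
    by_cases hx : x = ' ' <;> simp [pvCompact, hx]
  | case3 x y t hc ih =>
    obtain ⟨hx, hy⟩ := hc
    exact absurd (List.head_eq_of_cons_eq h) (Ne.symm hx)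
  | case4 x y t hc ih =>
    have ht : pvSweep (y :: t) = y :: t := List.tail_eq_of_cons_eq h
    have hyt := ih ht
    by_cases hx : x = ' '
    · subst hx
      have hstep : pvCompact (' ' :: y :: t) = ' ' :: pvCompact (y :: t) := by
        simp [pvCompact, List.count_cons, List.replicate_succ, List.filter_cons]
      rw [hstep, ← hyt]
    · have hy : y ≠ ' ' := by
        intro hy; exact hc ⟨hx, hy⟩
      have hcnt : (y :: t).count ' ' = 0 := by
        by_contra hpos
        have : 0 < (y :: t).count ' ' := Nat.pos_of_ne_zero hpos
        rw [pvCompact] at hyt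
        cases hk : (y :: t).count ' ' with
        | zero => omega
        | succ k =>
          rw [hk, List.replicate_succ] at hyt
          exact hy (List.head_eq_of_cons_eq hyt.symm).symm
      have hall : ∀ z ∈ x :: y :: t, z ≠ ' ' := by
        intro z hz
        rcases List.mem_cons.mp hz with rfl | hz2
        · exact hx
        · have h0 := List.count_eq_zero.mp hcnt
          intro he; subst he; exact h0 hz2
      rw [pvCompact]
      have hc0 : (x :: y :: t).count ' ' = 0 := by
        simp [hcnt, hx]
      rw [hc0]
      simp only [List.replicate_zero, List.nil_append]
      rw [List.filter_eq_self.mpr]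
      intro z hz
      simpa using hall z hz

theorem pvNu_le (c : List Char) : pvNu c ≤ c.length * c.length := by
  induction c with
  | nil => simp [pvNu]
  | cons x t ih =>
    simp only [pvNu, List.length_cons]
    have : (if x = ' ' then 0 else t.length + 1) ≤ t.length + 1 := by split <;> omega
    nlinarith [ih]


theorem pvPairSweep_len (r s : List Char) :
    (pvPairSweep r s).1.length = r.length ∧ (pvPairSweep r s).2.1.length = s.length := by
  fun_induction pvPairSweep r s with
  | case1 a r bb s p hc ih => simp_all [p]
  | case2 a r bb s p hc ih => simp_all [p]
  | case3 r s h => simp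

theorem pvPairSweep_point (r s : List Char) (hr : r.length = s.length) (k : Nat) :
    (pvPairSweep r s).1.getD k ' ' =
      (if r.getD k ' ' ≠ ' ' ∧ s.getD k ' ' = ' ' then s.getD k ' ' else r.getD k ' ') ∧
    (pvPairSweep r s).2.1.getD k ' ' =
      (if r.getD k ' ' ≠ ' ' ∧ s.getD k ' ' = ' ' then r.getD k ' ' else s.getD k ' ') := by
  induction r generalizing s k with
  | nil =>
    cases s with
    | nil => simp [pvPairSweep]
    | cons bb s => simp at hr
  | cons a r ih =>
    cases s with
    | nil => simp at hr
    | cons bb s =>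
      simp only [List.length_cons, Nat.add_right_cancel_iff] at hr
      cases k with
      | zero =>
        by_cases hc : a ≠ ' ' ∧ bb = ' ' <;> simp [pvPairSweep, hc]
      | succ k =>
        have hk := ih s hr k
        by_cases hc : a ≠ ' ' ∧ bb = ' ' <;>
          simpa [pvPairSweep, hc] using hk

theorem pvPairSweep_false (r s : List Char) (h : (pvPairSweep r s).2.2 = false) :
    pvPairSweep r s = (r, s, false) := by
  fun_induction pvPairSweep r s with
  | case1 a r bb s p hc ih => simp at h
  | case2 a r bb s p hc ih =>
    simp only [p] at h ⊢
    rw [ih h]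
  | case3 r s h2 => rfl

theorem pvPairSweep_true (r s : List Char) (h : (pvPairSweep r s).2.2 = true) :
    (pvPairSweep r s).1 ≠ r := by
  fun_induction pvPairSweep r s with
  | case1 a r bb s p hc ih =>
    simp only [p]
    intro he
    exact hc.1 (by rw [← List.head_eq_of_cons_eq he, hc.2])
  | case2 a r bb s p hc ih =>
    simp only [p] at h ⊢
    intro he
    exact ih h (List.tail_eq_of_cons_eq he)
  | case3 r s h2 => simp at h

theorem pvRowSweep_len (b : List (List Char)) : (pvRowSweep b).1.length = b.length := by
  fun_induction pvRowSweep b with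
  | case1 r1 r2 rest p q ih =>
    simp only [List.length_cons] at *
    have := (pvPairSweep_len r1 r2).2
    simp_all [p, q]
  | case2 l h => rfl

theorem pvRowSweep_rows (N : Nat) (b : List (List Char)) (hN : ∀ r ∈ b, r.length = N) :
    ∀ r ∈ (pvRowSweep b).1, r.length = N := by
  fun_induction pvRowSweep b with
  | case1 r1 r2 rest p q ih =>
    intro r hr
    simp only [p, q] at hr
    rcases List.mem_cons.mp hr with rfl | hr2
    · rw [(pvPairSweep_len r1 r2).1]; exact hN r1 (by simp)
    · refine ih ?_ r hr2
      intro r' hr'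
      rcases List.mem_cons.mp hr' with rfl | hr''
      · simp only [p]
        rw [(pvPairSweep_len r1 r2).2]; exact hN r2 (by simp)
      · exact hN r' (by simp [hr''])
  | case2 l h => exact hN

theorem pvRowSweep_false (b : List (List Char)) (h : (pvRowSweep b).2 = false) :
    (pvRowSweep b).1 = b := by
  fun_induction pvRowSweep b with
  | case1 r1 r2 rest p q ih =>
    simp only [p, q, Bool.or_eq_false_iff] at h ⊢
    have hp := pvPairSweep_false r1 r2 h.1
    have hq := ih h.2
    simp only [p, hp] at hq ⊢
    simp only [hq]
  | case2 l h2 => rfl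

theorem pvRowSweep_true (b : List (List Char)) (h : (pvRowSweep b).2 = true) :
    (pvRowSweep b).1 ≠ b := by
  fun_induction pvRowSweep b with
  | case1 r1 r2 rest p q ih =>
    simp only [p, q, Bool.or_eq_true] at h ⊢
    by_cases ht : (pvPairSweep r1 r2).2.2 = true
    · intro he
      exact pvPairSweep_true r1 r2 ht (List.head_eq_of_cons_eq he)
    · have hf : (pvPairSweep r1 r2).2.2 = false := Bool.eq_false_iff.mpr ht
      have hp := pvPairSweep_false r1 r2 hf
      have h2 : (pvRowSweep ((pvPairSweep r1 r2).2.1 :: rest)).2 = true := by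
        rcases h with h | h
        · exact absurd h ht
        · exact h
      intro he
      have hne := ih h2
      have hr2p : (pvPairSweep r1 r2).2.1 = r2 := by rw [hp]
      simp only [p, hr2p] at hne
      have hta := List.tail_eq_of_cons_eq he
      rw [hr2p] at hta
      exact hne hta
  | case2 l h2 => simp at h

theorem pvCol_cons (j : Nat) (r : List Char) (b : List (List Char)) :
    pvCol j (r :: b) = r.getD j ' ' :: pvCol j b := rfl

theorem pvRowSweep_col (N : Nat) (b : List (List Char)) (hN : ∀ r ∈ b, r.length = N)
    (j : Nat) : pvCol j ((pvRowSweep b).1) = pvSweep (pvCol j b) := by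
  fun_induction pvRowSweep b with
  | case1 r1 r2 rest p q ih =>
    have hr1 : r1.length = N := hN r1 (by simp)
    have hr2 : r2.length = N := hN r2 (by simp)
    have hpt := pvPairSweep_point r1 r2 (by rw [hr1, hr2]) j
    have hrows : ∀ r ∈ (pvPairSweep r1 r2).2.1 :: rest, r.length = N := by
      intro r hr
      rcases List.mem_cons.mp hr with rfl | hr2'
      · rw [(pvPairSweep_len r1 r2).2]; exact hr2
      · exact hN r (by simp [hr2'])
    have ihq := ih hrows
    simp only [p, q]
    rw [pvCol_cons, pvCol_cons, pvCol_cons, ihq, pvCol_cons]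
    rw [hpt.1, hpt.2]
    by_cases hc : r1.getD j ' ' ≠ ' ' ∧ r2.getD j ' ' = ' '
    · rw [if_pos hc, if_pos hc]
      simp only [pvSweep]
      rw [if_pos hc, hc.2]
    · rw [if_neg hc, if_neg hc]
      simp only [pvSweep]
      rw [if_neg hc]
  | case2 l h =>
    cases l with
    | nil => simp [pvCol, pvSweep]
    | cons r l =>
      cases l with
      | nil => simp [pvCol, pvSweep]
      | cons r2 l2 => exact absurd rfl (h r r2 l2)


theorem pvGetMid {α : Type} (P Q : List α) (x : α) (d : α) :
    PySem.List.pyGetD (P ++ x :: Q) (↑P.length) d = x := by simp [pysem]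

theorem pvGetMid2 {α : Type} (P Q : List α) (x y : α) (d : α) :
    PySem.List.pyGetD (P ++ x :: y :: Q) ((↑P.length : Int) + 1) d = y := by
  have e : P ++ x :: y :: Q = (P ++ [x]) ++ y :: Q := by simp
  have hc : ((P.length : Int) + 1) = ↑((P ++ [x]).length) := by simp
  rw [e, hc, pvGetMid]

theorem pvSetMid {α : Type} (P Q : List α) (x v : α) :
    PySem.List.pySetD (P ++ x :: Q) (↑P.length) v = P ++ v :: Q := by simp [pysem]

theorem pvSetMid2 {α : Type} (P Q : List α) (x y v : α) :
    PySem.List.pySetD (P ++ x :: y :: Q) ((↑P.length : Int) + 1) v = P ++ x :: v :: Q := by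
  have e : P ++ x :: y :: Q = (P ++ [x]) ++ y :: Q := by simp
  have e2 : P ++ x :: v :: Q = (P ++ [x]) ++ v :: Q := by simp
  have hc : ((P.length : Int) + 1) = ↑((P ++ [x]).length) := by simp
  rw [e, e2, hc, pvSetMid]

theorem pvJloop (P : List (List Char)) (N : Nat) :
    ∀ (r s2 u v : List Char) (Q : List (List Char)) (mv : Int),
    u.length = v.length → r.length = s2.length → u.length + r.length = N →
    (PySem.List.pyRange (↑u.length) (↑N) 1).foldl (pvSwapStepA ↑P.length)
      (P ++ (u ++ r) :: (v ++ s2) :: Q, mv) =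
    (P ++ (u ++ (pvPairSweep r s2).1) :: (v ++ (pvPairSweep r s2).2.1) :: Q,
      if (pvPairSweep r s2).2.2 then 1 else mv) := by
  intro r
  induction r with
  | nil =>
    intro s2 u v Q mv hu hr hN0
    cases s2 with
    | cons bb s => simp at hr
    | nil =>
      have hN : u.length = N := by simpa using hN0
      rw [PySem.List.pyRange_one_eq_nil (by omega)]
      simp [pvPairSweep]
  | cons a r ih =>
    intro s2 u v Q mv hu hr hN0
    cases s2 with
    | nil => simp at hr
    | cons bb s =>
      simp only [List.length_cons, Nat.add_right_cancel_iff] at hr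
      have hN : u.length + (r.length + 1) = N := by simpa using hN0
      rw [PySem.List.pyRange_one_cons (by omega), List.foldl_cons]
      have huv : ((u.length : Nat) : Int) = ↑v.length := by rw [hu]
      have hca : pvCell (P ++ (u ++ a :: r) :: (v ++ bb :: s) :: Q) (↑P.length)
          (↑u.length) = a := by
        unfold pvCell
        rw [pvGetMid, pvGetMid]
      have hcb : pvCell (P ++ (u ++ a :: r) :: (v ++ bb :: s) :: Q) ((↑P.length : Int) + 1)
          (↑u.length) = bb := by
        unfold pvCell
        rw [pvGetMid2, huv, pvGetMid]
      by_cases hc : a ≠ ' ' ∧ bb = ' '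
      · have hstep : pvSwapStepA (↑P.length) (P ++ (u ++ a :: r) :: (v ++ bb :: s) :: Q, mv)
            (↑u.length) = (P ++ (u ++ bb :: r) :: (v ++ a :: s) :: Q, 1) := by
          unfold pvSwapStepA pvSetCell
          simp only [hca, hcb]
          rw [if_pos hc]
          rw [pvGetMid, pvSetMid, pvSetMid, pvGetMid2, huv, pvSetMid, pvSetMid2]
        rw [hstep]
        have hiu : ((↑u.length : Int) + 1) = ↑((u ++ [bb]).length) := by simp
        have hb1 : u ++ bb :: r = (u ++ [bb]) ++ r := by simp
        have hb2 : v ++ a :: s = (v ++ [a]) ++ s := by simp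
        rw [hiu, hb1, hb2]
        rw [ih s (u ++ [bb]) (v ++ [a]) Q 1 (by simp [hu]) hr (by simp; omega)]
        simp only [pvPairSweep]
        simp [hc]
      · have hstep : pvSwapStepA (↑P.length) (P ++ (u ++ a :: r) :: (v ++ bb :: s) :: Q, mv)
            (↑u.length) = (P ++ (u ++ a :: r) :: (v ++ bb :: s) :: Q, mv) := by
          unfold pvSwapStepA
          simp only [hca, hcb]
          rw [if_neg hc]
        rw [hstep]
        have hiu : ((↑u.length : Int) + 1) = ↑((u ++ [a]).length) := by simp
        have hb1 : u ++ a :: r = (u ++ [a]) ++ r := by simp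
        have hb2 : v ++ bb :: s = (v ++ [bb]) ++ s := by simp
        rw [hiu, hb1, hb2]
        rw [ih s (u ++ [a]) (v ++ [bb]) Q mv (by simp [hu]) hr (by simp; omega)]
        simp only [pvPairSweep]
        simp [hc]


theorem pvIloop (N : Nat) : ∀ (k : Nat) (rest P : List (List Char)) (mv : Int) (M : Nat),
    rest.length = k → (∀ r ∈ rest, r.length = N) → P.length + rest.length = M →
    (PySem.List.pyRange (↑P.length) ((↑M : Int) - 1) 1).foldl
      (fun st i => (PySem.List.pyRange 0 (↑N) 1).foldl (pvSwapStepA i) st) (P ++ rest, mv) =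
    (P ++ (pvRowSweep rest).1, if (pvRowSweep rest).2 then 1 else mv) := by
  intro k
  induction k with
  | zero =>
    intro rest P mv M hk hrows hM
    have : rest = [] := List.length_eq_zero_iff.mp hk
    subst this
    have hM' : P.length = M := by simpa using hM
    have hnil : PySem.List.pyRange (↑P.length : Int) ((↑M : Int) - 1) 1 = [] :=
      PySem.List.pyRange_one_eq_nil (by omega)
    rw [hnil]
    simp [pvRowSweep]
  | succ k ihk =>
    intro rest P mv M hk hrows hM
    cases rest with
    | nil => simp at hk
    | cons r1 rest' =>
      cases rest' with
      | nil =>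
        have hM' : P.length + 1 = M := by simpa using hM
        have hnil : PySem.List.pyRange (↑P.length : Int) ((↑M : Int) - 1) 1 = [] :=
          PySem.List.pyRange_one_eq_nil (by omega)
        rw [hnil]
        simp [pvRowSweep]
      | cons r2 rest'' =>
        have hM' : P.length + (rest''.length + 2) = M := by simpa using hM
        have hlt : (↑P.length : Int) < (↑M : Int) - 1 := by omega
        rw [PySem.List.pyRange_one_cons hlt, List.foldl_cons]
        have hr1 : r1.length = N := hrows r1 (by simp)
        have hr2 : r2.length = N := hrows r2 (by simp)
        have hj := pvJloop P N r1 r2 [] [] rest'' mv rfl (by rw [hr1, hr2])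
          (by simpa using hr1)
        simp only [List.nil_append, List.length_nil, Nat.cast_zero] at hj
        rw [hj]
        have hb : P ++ (pvPairSweep r1 r2).1 :: (pvPairSweep r1 r2).2.1 :: rest''
            = (P ++ [(pvPairSweep r1 r2).1]) ++ (pvPairSweep r1 r2).2.1 :: rest'' := by simp
        have hip : ((↑P.length : Int) + 1) = ↑((P ++ [(pvPairSweep r1 r2).1]).length) := by simp
        rw [hb, hip]
        rw [ihk ((pvPairSweep r1 r2).2.1 :: rest'') (P ++ [(pvPairSweep r1 r2).1]) _ M
          (by simp at hk ⊢; omega)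
          (by
            intro r hr
            rcases List.mem_cons.mp hr with rfl | hr'
            · rw [(pvPairSweep_len r1 r2).2]; exact hr2
            · exact hrows r (by simp [hr']))
          (by simp; omega)]
        simp only [pvRowSweep]
        rw [Prod.mk.injEq]
        constructor
        · simp
        · by_cases hps : (pvPairSweep r1 r2).2.2 = true <;>
            by_cases hq : (pvRowSweep ((pvPairSweep r1 r2).2.1 :: rest'')).2 = true <;>
            simp [hps, hq]

theorem pvPassA_eq (M N : Nat) (b : List (List Char))
    (hrows : ∀ r ∈ b, r.length = N) (hlen : b.length = M) :
    pvPassA (↑M) (↑N) b = ((pvRowSweep b).1, if (pvRowSweep b).2 then 1 else 0) := by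
  unfold pvPassA
  have h := pvIloop N b.length b [] 0 M rfl hrows (by simpa using hlen)
  simp only [List.nil_append, List.length_nil, Nat.cast_zero] at h
  exact h


theorem pvBoardExt (M N : Nat) (b1 b2 : List (List Char))
    (h1 : pvShape M N b1) (h2 : pvShape M N b2)
    (hcols : ∀ j < N, pvCol j b1 = pvCol j b2) : b1 = b2 := by
  apply List.ext_getElem (by rw [h1.1, h2.1])
  intro i hi1 hi2
  have hri : b1[i].length = N := h1.2 _ (List.getElem_mem hi1)
  have hri2 : b2[i].length = N := h2.2 _ (List.getElem_mem hi2)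
  apply List.ext_getElem (by rw [hri, hri2])
  intro j hj1 hj2
  have hjN : j < N := by rw [← hri]; exact hj1
  have hc := congrArg (fun l => l[i]?) (hcols j hjN)
  simp only [pvCol, List.getElem?_map] at hc
  rw [List.getElem?_eq_getElem hi1, List.getElem?_eq_getElem hi2] at hc
  simp only [Option.map_some, Option.some.injEq] at hc
  rw [List.getD_eq_getElem _ _ hj1, List.getD_eq_getElem _ _ hj2] at hc
  exact hc

theorem pvGravA_compacts (M N : Nat) : ∀ (fuel : Nat) (b : List (List Char)),
    pvShape M N b →
    (Finset.range N).sum (fun j => pvNu (pvCol j b)) < fuel →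
    pvShape M N (pvGravA (↑M) (↑N) fuel b) ∧
    ∀ j, j < N → pvCol j (pvGravA (↑M) (↑N) fuel b) = pvCompact (pvCol j b) := by
  intro fuel
  induction fuel with
  | zero => intro b hs hlt; omega
  | succ f ih =>
    intro b hs hlt
    simp only [pvGravA]
    rw [pvPassA_eq M N b hs.2 hs.1]
    by_cases hflag : (pvRowSweep b).2 = true
    · have hshape' : pvShape M N (pvRowSweep b).1 :=
        ⟨by rw [pvRowSweep_len, hs.1], pvRowSweep_rows N b hs.2⟩
      have hcols := pvRowSweep_col N b hs.2
      have hne := pvRowSweep_true b hflag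
      have hexists : ∃ j, j < N ∧ pvCol j (pvRowSweep b).1 ≠ pvCol j b := by
        by_contra hno
        push Not at hno
        exact hne (pvBoardExt M N _ b hshape' hs hno)
      obtain ⟨j0, hj0, hne0⟩ := hexists
      have hsum : (Finset.range N).sum (fun j => pvNu (pvCol j (pvRowSweep b).1))
          < (Finset.range N).sum (fun j => pvNu (pvCol j b)) := by
        apply Finset.sum_lt_sum
        · intro j hj
          rw [hcols j]
          exact pvNu_sweep_le _
        · refine ⟨j0, Finset.mem_range.mpr hj0, ?_⟩
          rw [hcols j0]
          apply pvNu_sweep_lt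
          rw [← hcols j0]
          exact hne0
      have ih' := ih (pvRowSweep b).1 hshape' (by omega)
      simp only [hflag, if_true]
      have h10 : (1 : Int) ≠ 0 := by norm_num
      rw [if_neg h10]
      refine ⟨ih'.1, ?_⟩
      intro j hj
      rw [ih'.2 j hj, hcols j, pvCompact_sweep]
    · have hb := pvRowSweep_false b (Bool.eq_false_iff.mpr hflag)
      simp only [hflag]
      norm_num
      refine ⟨by rw [hb]; exact hs, ?_⟩
      intro j hj
      rw [hb]
      apply pvSweep_fix
      have := pvRowSweep_col N b hs.2 j
      rw [hb] at this
      exact this.symm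


theorem pvScanStep_eq (b : List (List Char)) (i : Int) (tmp : PySem.Set (Int × Int)) (j : Int) :
    pvScanStepA b i tmp j =
    (if pvCell b i j ≠ ' ' ∧ pvCell b i j = pvCell b (i+1) j ∧
        pvCell b (i+1) j = pvCell b i (j+1) ∧ pvCell b i (j+1) = pvCell b (i+1) (j+1) then
      [(i, j), (i+1, j), (i, j+1), (i+1, j+1)]
    else ([] : List (Int × Int))).foldl PySem.Set.add tmp := by
  unfold pvScanStepA
  by_cases ht : pvCell b i j = ' '
  · rw [if_pos ht, if_neg, List.foldl_nil]
    rintro ⟨h1, -⟩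
    exact h1 ht
  · rw [if_neg ht]
    have hiff : (pvCell b (i+1) j = pvCell b i j ∧ pvCell b i (j+1) = pvCell b i j ∧
        pvCell b (i+1) (j+1) = pvCell b i j)
        ↔ (pvCell b i j ≠ ' ' ∧ pvCell b i j = pvCell b (i+1) j ∧
        pvCell b (i+1) j = pvCell b i (j+1) ∧ pvCell b i (j+1) = pvCell b (i+1) (j+1)) := by
      constructor
      · rintro ⟨h1, h2, h3⟩
        exact ⟨ht, h1.symm, h1.trans h2.symm, h2.trans h3.symm⟩
      · rintro ⟨-, h1, h2, h3⟩
        exact ⟨h1.symm, (h1.trans h2).symm, (h1.trans (h2.trans h3)).symm⟩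
    rw [if_congr hiff rfl rfl]
    split
    · rfl
    · rfl

theorem pvScan_eq (m n : Int) (b : List (List Char)) : pvScanA m n b = pvMarksB m n b := by
  unfold pvScanA pvMarksB
  rw [PySem.Set.ofList_eq_foldl, List.foldl_flatMap]
  congr 1
  funext tmp i
  rw [List.foldl_flatMap]
  congr 1
  funext a j
  exact pvScanStep_eq b i a j

theorem pvMarks_mem (m n : Int) (b : List (List Char)) :
    ∀ p ∈ pvMarksB m n b, 0 ≤ p.1 ∧ p.1 < m ∧ 0 ≤ p.2 ∧ p.2 < n := by
  intro p hp
  unfold pvMarksB at hp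
  rw [PySem.Set.mem_ofList] at hp
  simp only [List.mem_flatMap] at hp
  obtain ⟨i, hi, j, hj, hpin⟩ := hp
  rw [PySem.List.mem_pyRange_one] at hi hj
  split at hpin
  · simp only [List.mem_cons, List.not_mem_nil, or_false] at hpin
    rcases hpin with rfl | rfl | rfl | rfl <;> simp <;> omega
  · simp at hpin


theorem pvSetCell_shape (M N : Nat) (b : List (List Char)) (hs : pvShape M N b)
    (i j : Int) (hi : 0 ≤ i ∧ i < ↑M) (v : Char) : pvShape M N (pvSetCell b i j v) := by
  unfold pvSetCell
  have hiM : i.toNat < b.length := by rw [hs.1]; omega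
  rw [PySem.List.pySetD_of_nonneg _ _ hi.1]
  constructor
  · rw [List.length_set, hs.1]
  · intro r hr
    rcases List.mem_or_eq_of_mem_set hr with hmem | rfl
    · exact hs.2 r hmem
    · rw [PySem.List.length_pySetD]
      rw [PySem.List.pyGetD_of_nonneg _ _ hi.1, List.getD_eq_getElem _ _ hiM]
      exact hs.2 _ (List.getElem_mem hiM)

theorem pvGetDSet {α : Type} (l : List α) (k i : Nat) (x : α) (d : α) (hi : i < l.length) :
    (l.set k x).getD i d = if k = i then x else l.getD i d := by
  rw [List.getD_eq_getElem _ _ (by rw [List.length_set]; exact hi),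
      List.getElem_set, List.getD_eq_getElem _ _ hi]

theorem pvCell_setCell (M N : Nat) (b : List (List Char)) (hs : pvShape M N b)
    (pi pj : Int) (hpi : 0 ≤ pi ∧ pi < ↑M) (hpj : 0 ≤ pj ∧ pj < ↑N) (v : Char)
    (i j : Nat) (hi : i < M) (hj : j < N) :
    pvCell (pvSetCell b pi pj v) ↑i ↑j = if pi = ↑i ∧ pj = ↑j then v else pvCell b ↑i ↑j := by
  have hiM : i < b.length := by rw [hs.1]; exact hi
  have hpiM : pi.toNat < b.length := by rw [hs.1]; omega
  have hrowlen : b[pi.toNat].length = N := hs.2 _ (List.getElem_mem hpiM)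
  unfold pvSetCell pvCell
  rw [PySem.List.pySetD_of_nonneg _ _ hpi.1]
  simp only [PySem.List.pyGetD_natCast]
  rw [pvGetDSet b pi.toNat i _ [] hiM]
  by_cases hpieq : pi.toNat = i
  · rw [if_pos hpieq]
    rw [PySem.List.pyGetD_of_nonneg _ _ hpi.1, PySem.List.pySetD_of_nonneg _ _ hpj.1]
    rw [List.getD_eq_getElem _ _ hpiM]
    rw [pvGetDSet _ pj.toNat j v ' ' (by rw [hrowlen]; exact hj)]
    by_cases hpjeq : pj.toNat = j
    · rw [if_pos hpjeq, if_pos ⟨by omega, by omega⟩]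
    · rw [if_neg hpjeq, if_neg (by rintro ⟨h1, h2⟩; omega)]
      subst hpieq
      rw [List.getD_eq_getElem _ _ hpiM]
  · rw [if_neg hpieq, if_neg (by rintro ⟨h1, h2⟩; omega)]

theorem pvRemove_point (M N : Nat) :
    ∀ (l : List (Int × Int)) (b : List (List Char)), pvShape M N b →
    (∀ p ∈ l, 0 ≤ p.1 ∧ p.1 < ↑M ∧ 0 ≤ p.2 ∧ p.2 < ↑N) →
    pvShape M N (l.foldl (fun b ij => pvSetCell b ij.1 ij.2 ' ') b) ∧
    ∀ (i j : Nat), i < M → j < N →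
      pvCell (l.foldl (fun b ij => pvSetCell b ij.1 ij.2 ' ') b) ↑i ↑j
        = if ((i : Int), (j : Int)) ∈ l then ' ' else pvCell b ↑i ↑j := by
  intro l
  induction l with
  | nil =>
    intro b hs hb
    simp
    exact hs
  | cons p l ih =>
    intro b hs hb
    have hp := hb p (by simp)
    have hs' : pvShape M N (pvSetCell b p.1 p.2 ' ') :=
      pvSetCell_shape M N b hs p.1 p.2 ⟨hp.1, hp.2.1⟩ ' '
    have hrest : ∀ q ∈ l, 0 ≤ q.1 ∧ q.1 < ↑M ∧ 0 ≤ q.2 ∧ q.2 < ↑N := by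
      intro q hq; exact hb q (by simp [hq])
    have ihh := ih (pvSetCell b p.1 p.2 ' ') hs' hrest
    rw [List.foldl_cons]
    refine ⟨ihh.1, ?_⟩
    intro i j hi hj
    rw [ihh.2 i j hi hj]
    rw [pvCell_setCell M N b hs p.1 p.2 ⟨hp.1, hp.2.1⟩ ⟨hp.2.2.1, hp.2.2.2⟩ ' ' i j hi hj]
    by_cases hmem : ((i : Int), (j : Int)) ∈ l
    · rw [if_pos hmem, if_pos (List.mem_cons_of_mem _ hmem)]
    · rw [if_neg hmem]
      by_cases hpe : p.1 = ↑i ∧ p.2 = ↑j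
      · rw [if_pos hpe, if_pos (by
          rw [List.mem_cons]
          exact Or.inl (by rw [Prod.ext_iff]; exact ⟨hpe.1.symm, hpe.2.symm⟩))]
      · rw [if_neg hpe, if_neg]
        simp only [List.mem_cons]
        rintro (he | hmem2)
        · exact hpe ⟨by rw [← he], by rw [← he]⟩
        · exact hmem hmem2


theorem pvFilterOfMap {α β : Type} (g : α → β) (p : β → Bool) (l : List α) :
    (l.map g).filter p = l.filterMap (fun i => if p (g i) then some (g i) else none) := by
  induction l with
  | nil => rfl
  | cons a l ih =>
    by_cases h : p (g a) <;> simp [h, ih]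

theorem pvListAsMap (c : List Char) :
    c = (List.range c.length).map (fun i => c.getD i ' ') := by
  apply List.ext_getElem (by simp)
  intro i h1 h2
  simp [List.getD, List.getElem?_eq_getElem h1]

theorem pvKept_eq (M : Nat) (b : List (List Char)) (marks : List (Int × Int)) (c : List Char)
    (j : Nat) (hc : c.length = M)
    (hcell : ∀ i : Nat, i < M →
      c.getD i ' ' = if ((i : Int), (j : Int)) ∈ marks then ' ' else pvCell b ↑i ↑j) :
    pvKeptB ↑M b marks ↑j = c.filter (fun x => x ≠ ' ') := by
  unfold pvKeptB
  rw [PySem.List.pyRange_zero_nat, List.filterMap_map]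
  conv_rhs => rw [pvListAsMap c, hc, pvFilterOfMap]
  apply List.filterMap_congr
  intro i hi
  rw [List.mem_range] at hi
  have hgi := hcell i hi
  simp only [Function.comp_apply]
  by_cases hmem : ((i : Int), (j : Int)) ∈ marks
  · rw [if_pos hmem] at hgi
    rw [hgi]
    simp [hmem]
  · rw [if_neg hmem] at hgi
    rw [hgi]
    by_cases hsp : pvCell b ↑i ↑j = ' ' <;> simp [hsp, hmem]

theorem pvB_cells (M N : Nat) (b : List (List Char)) (marks : PySem.Set (Int × Int))
    (i j : Nat) (hi : i < M) (hj : j < N) :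
    pvCell (pvRegridB ↑M ↑N (pvColsB ↑M ↑N b marks)) ↑i ↑j
      = PySem.List.pyGetD
          (List.replicate ((↑M : Int) - PySem.List.len (pvKeptB ↑M b marks ↑j)).toNat ' '
            ++ pvKeptB ↑M b marks ↑j) ↑i ' ' := by
  unfold pvRegridB pvCell
  rw [PySem.List.pyGetD_map_pyRange _ M i _ hi]
  rw [PySem.List.pyGetD_map_pyRange _ N j _ hj]
  unfold pvColsB
  rw [PySem.List.pyGetD_map_pyRange _ N j _ hj]

theorem pvRegridB_shape (M N : Nat) (cols : List (List Char)) :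
    pvShape M N (pvRegridB ↑M ↑N cols) := by
  unfold pvRegridB
  constructor
  · rw [List.length_map, PySem.List.length_pyRange_one]
    simp
  · intro r hr
    rw [List.mem_map] at hr
    obtain ⟨x, -, rfl⟩ := hr
    rw [List.length_map, PySem.List.length_pyRange_one]
    simp


theorem pvCell_col (M N : Nat) (b : List (List Char)) (hs : pvShape M N b)
    (i j : Nat) (hi : i < M) :
    (pvCol j b).getD i ' ' = pvCell b ↑i ↑j := by
  have hib : i < b.length := by rw [hs.1]; exact hi
  unfold pvCol pvCell
  simp only [PySem.List.pyGetD_natCast]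
  rw [PySem.List.getD_map_of_lt _ _ _ _ hib]
  rw [List.getD_eq_getElem _ _ hib]

theorem pvExtByGetD (L1 L2 : List Char) (h1 : L1.length = L2.length)
    (h : ∀ i : Nat, i < L1.length → L1.getD i ' ' = L2.getD i ' ') : L1 = L2 := by
  apply List.ext_getElem h1
  intro i hi1 hi2
  have hh := h i hi1
  rwa [List.getD_eq_getElem _ _ hi1, List.getD_eq_getElem _ _ hi2] at hh

theorem pvRound (M N : Nat) (b : List (List Char)) (hs : pvShape M N b) :
    pvGravA (↑M) (↑N) (((↑M : Int) * ↑M * ↑N).toNat + 1)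
        ((pvMarksB (↑M) (↑N) b).foldl (fun b ij => pvSetCell b ij.1 ij.2 ' ') b)
      = pvRegridB (↑M) (↑N) (pvColsB (↑M) (↑N) b (pvMarksB (↑M) (↑N) b)) := by
  have hmem := pvMarks_mem (↑M) (↑N) b
  have hrem := pvRemove_point M N (pvMarksB (↑M) (↑N) b) b hs hmem
  set b' := (pvMarksB (↑M) (↑N) b).foldl (fun b ij => pvSetCell b ij.1 ij.2 ' ') b with hb'
  have hs' : pvShape M N b' := hrem.1
  have hcollen : ∀ j : Nat, (pvCol j b').length = M := by
    intro j
    unfold pvCol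
    rw [List.length_map]
    exact hs'.1
  have hfuel : (Finset.range N).sum (fun j => pvNu (pvCol j b'))
      < ((↑M : Int) * ↑M * ↑N).toNat + 1 := by
    have hbound : ∀ j ∈ Finset.range N, pvNu (pvCol j b') ≤ M * M := by
      intro j hj
      have h := pvNu_le (pvCol j b')
      rwa [hcollen j] at h
    have hsum := Finset.sum_le_card_nsmul (Finset.range N) _ (M * M) hbound
    rw [Finset.card_range, smul_eq_mul] at hsum
    have hcast : ((↑M : Int) * ↑M * ↑N).toNat = M * M * N := by
      rw [show ((↑M : Int) * ↑M * ↑N) = ((M * M * N : Nat) : Int) by push_cast; ring]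
      exact Int.toNat_natCast _
    have hmm : M * M * N = N * (M * M) := by ring
    omega
  have hgrav := pvGravA_compacts M N _ b' hs' hfuel
  apply pvBoardExt M N _ _ hgrav.1 (pvRegridB_shape M N _)
  intro j hj
  rw [hgrav.2 j hj]
  have hcell : ∀ i : Nat, i < M → (pvCol j b').getD i ' '
      = if ((i : Int), (j : Int)) ∈ pvMarksB (↑M) (↑N) b then ' ' else pvCell b ↑i ↑j := by
    intro i hi
    rw [pvCell_col M N b' hs' i j hi]
    exact hrem.2 i j hi hj
  have hkept := pvKept_eq M b (pvMarksB (↑M) (↑N) b) (pvCol j b') j (hcollen j) hcell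
  have hflen : ((pvCol j b').filter (fun x => x ≠ ' ')).length ≤ M := by
    calc ((pvCol j b').filter (fun x => x ≠ ' ')).length
        ≤ (pvCol j b').length := List.length_filter_le _ _
      _ = M := hcollen j
  have hcount : (pvCol j b').count ' '
      = M - ((pvCol j b').filter (fun x => x ≠ ' ')).length := by
    have h1 : (pvCol j b').length
        = ((pvCol j b').filter (fun x => x == ' ')).length
          + ((pvCol j b').filter (fun x => !(x == ' '))).length :=
      List.length_eq_length_filter_add _
    have h2 : (pvCol j b').count ' ' = ((pvCol j b').filter (fun x => x == ' ')).length :=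
      List.count_eq_length_filter
    have h3 : ((pvCol j b').filter (fun x => !(x == ' '))).length
        = ((pvCol j b').filter (fun x => x ≠ ' ')).length := by
      congr 1
      apply List.filter_congr
      intro x _
      by_cases hxe : x = ' ' <;> simp [hxe]
    rw [h2]
    rw [h3] at h1
    have h4 := hcollen j
    omega
  have hL : List.replicate (((↑M : Int)
        - PySem.List.len (pvKeptB (↑M) b (pvMarksB (↑M) (↑N) b) ↑j)).toNat) ' '
      ++ pvKeptB (↑M) b (pvMarksB (↑M) (↑N) b) ↑j = pvCompact (pvCol j b') := by
    rw [hkept]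
    unfold pvCompact
    congr 2
    rw [PySem.List.len_eq, hcount]
    omega
  have hlenL : (pvCompact (pvCol j b')).length = M := by
    unfold pvCompact
    rw [List.length_append, List.length_replicate, hcount]
    omega
  apply pvExtByGetD
  · rw [hlenL]
    unfold pvCol
    rw [List.length_map, (pvRegridB_shape M N _).1]
  · intro i hi
    have hiM : i < M := by rwa [hlenL] at hi
    rw [pvCell_col M N _ (pvRegridB_shape M N _) i j hiM]
    rw [pvB_cells M N b (pvMarksB (↑M) (↑N) b) i j hiM hj]
    rw [hL, PySem.List.pyGetD_natCast]

theorem pvLoop_eq (M N : Nat) : ∀ (fuel : Nat) (b : List (List Char)) (ans : Int),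
    pvShape M N b → pvLoopA (↑M) (↑N) fuel b ans = pvLoopB (↑M) (↑N) fuel b ans := by
  intro fuel
  induction fuel with
  | zero => intro b ans hs; rfl
  | succ f ih =>
    intro b ans hs
    simp only [pvLoopA, pvLoopB]
    rw [pvScan_eq]
    by_cases hmk : pvMarksB (↑M) (↑N) b = []
    · rw [if_pos hmk, if_pos hmk]
    · rw [if_neg hmk, if_neg hmk]
      rw [pvRound M N b hs]
      exact ih _ _ (pvRegridB_shape M N _)

theorem pvDegen (m n : Int) (b : List (List Char)) (hmn : m ≤ 1 ∨ n ≤ 1) :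
    pvScanA m n b = ([] : List (Int × Int)) ∧ pvMarksB m n b = [] := by
  unfold pvScanA pvMarksB
  rcases hmn with h | h
  · have hout : PySem.List.pyRange 0 (m - 1) 1 = [] :=
      PySem.List.pyRange_one_eq_nil (by omega)
    simp only [hout]
    exact ⟨rfl, rfl⟩
  · have hin : PySem.List.pyRange 0 (n - 1) 1 = [] :=
      PySem.List.pyRange_one_eq_nil (by omega)
    simp only [hin, List.foldl_nil]
    constructor
    · generalize PySem.List.pyRange 0 (m - 1) 1 = l
      induction l with
      | nil => rfl
      | cons x l ihl => simp
    · have hfm : ∀ l : List Int, (l.flatMap (fun _ => ([] : List (Int × Int)))) = [] := by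
        intro l
        induction l <;> simp_all
      simp only [List.flatMap_nil]
      rw [hfm]
      rfl

theorem solution_spec : Claim_equal_solution := by
  unfold Claim_equal_solution
  intro m n board hdom hpre
  unfold Spec_solution solution solution_alt
  by_cases hdeg : m ≤ 1 ∨ n ≤ 1
  · have hd := pvDegen m n (board.map (fun row => row.toList)) hdeg
    simp only [pvLoopA, pvLoopB]
    rw [hd.1, hd.2]
    simp
  · rcases hpre with hdeg' | ⟨hm, hrows⟩
    · exact absurd hdeg' hdeg
    · have hn0 : 0 ≤ n := by omega
      have hnN : n = ↑n.toNat := (Int.toNat_of_nonneg hn0).symm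
      have hshape : pvShape board.length n.toNat (board.map (fun row => row.toList)) := by
        constructor
        · simp
        · intro r hr
          rw [List.mem_map] at hr
          obtain ⟨str, hsb, rfl⟩ := hr
          have hlen := hrows str hsb
          omega
      rw [hm, hnN]
      exact pvLoop_eq board.length n.toNat _ _ 0 hshape
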